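-- pv_equiv track=rewrite | github.com/merveacarrr/NLPlay | homework1/simple_pipeline.py | simple_vectorize
-- ===== SOURCE A (Python) =====
-- from collections import Counter
--
-- def simple_vectorize(texts, method='tfidf'):
--
--     #Basit vektörleştirme (TF-IDF benzeri)
--
--     # Tüm kelimeleri topla
--     all_words = []
--     for text in texts:
--         all_words.extend(text.split())
--
--     # Kelime frekanslarını hesapla
--     word_freq = Counter(all_words)
--
--     # En sık kelimeleri al (feature names)
--     feature_names = [word for word, freq in word_freq.most_common(20)]
--
--     # Matrix oluştur
--     matrix = []
--     for text in texts:
--         text_words = text.split()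
--         row = []
--         for feature in feature_names:
--             count = text_words.count(feature)
--             row.append(count)
--         matrix.append(row)
--
--     return feature_names, matrix
-- ===== SOURCE B (Python) =====
-- from collections import Counter
--
-- def simple_vectorize(texts, method='tfidf'):
--     # one-pass counting, then an index table drives a single pass per text
--     word_freq = Counter(w for t in texts for w in t.split())
--     feature_names = [w for w, _ in word_freq.most_common(20)]
--     col = {w: i for i, w in enumerate(feature_names)}
--     matrix = []
--     for text in texts:
--         row = [0] * len(feature_names)
--         for w in text.split():
--             i = col.get(w)
--             if i is not None:
--                 row[i] += 1
--         matrix.append(row)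
--     return feature_names, matrix
-- ===== Notes on version B (the rewrite author's own statement) =====
-- stated objective: faster
-- what changed: The per-text row is no longer built by scanning all 20 feature words and running a full text_words.count pass for each (20 passes over every text); instead a word->column index dict is built once and each text is vectorized in a single pass over its words, incrementing the looked-up column of a zero row.
import Mathlib
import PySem

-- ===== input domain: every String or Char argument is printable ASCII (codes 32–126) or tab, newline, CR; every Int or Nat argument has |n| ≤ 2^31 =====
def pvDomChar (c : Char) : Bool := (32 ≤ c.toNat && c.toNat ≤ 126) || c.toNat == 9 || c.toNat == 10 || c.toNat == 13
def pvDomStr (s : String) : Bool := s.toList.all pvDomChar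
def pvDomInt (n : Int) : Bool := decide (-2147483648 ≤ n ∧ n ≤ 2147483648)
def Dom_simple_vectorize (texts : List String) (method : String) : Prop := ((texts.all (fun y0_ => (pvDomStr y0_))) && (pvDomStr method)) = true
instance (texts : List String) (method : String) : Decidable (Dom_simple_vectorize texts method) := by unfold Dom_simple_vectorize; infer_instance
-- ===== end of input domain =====

-- B replaces A's per-row scan over the 20 features (each a full .count pass over the text)
-- by one index-table-driven pass over the text's words (objective: faster, constant-factor; measured).

-- ===== PORT A =====
-- Counter.most_common(20) is ported as: stable descending sort of the counter's items by count, first 20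
-- (CPython's documented equivalence most_common(n) = sorted(items, key=count, reverse=True)[:n]).
def simple_vectorize (texts : List String) (method : String) : List String × List (List Int) :=
  let all_words := texts.foldl (fun acc text => acc ++ PySem.Str.split₀ text) ([] : List String)
  let word_freq := PySem.Dict.counter all_words
  let feature_names := ((PySem.List.sorted word_freq.items (fun p => p.2) true).take 20).map (fun p => p.1)
  let matrix := texts.foldl (fun m text =>
      let text_words := PySem.Str.split₀ text
      let row := feature_names.foldl (fun r feature => r ++ [(PySem.List.count text_words feature : Int)]) ([] : List Int)
      m ++ [row]) ([] : List (List Int))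
  (feature_names, matrix)

-- ===== PORT B =====
-- port of {w: i for i, w in enumerate(feature_names)}: insert the (word, position) pairs in order
-- (positions are the nonnegative enumerate indices, kept as Nat).
def svCol (fs : List String) : PySem.Dict String Nat :=
  fs.zipIdx.foldl (fun d p => d.insert p.1 p.2) PySem.Dict.empty

def simple_vectorize_alt (texts : List String) (method : String) : List String × List (List Int) :=
  let word_freq := PySem.Dict.counter (texts.flatMap PySem.Str.split₀)
  let feature_names := ((PySem.List.sorted word_freq.items (fun p => p.2) true).take 20).map (fun p => p.1)
  let col := svCol feature_names
  let matrix := texts.foldl (fun m text =>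
      let row := (PySem.Str.split₀ text).foldl (fun r w =>
          match col.get? w with
          | some i => r.set i (r.getD i 0 + 1)   -- row[i] += 1; i is always a valid position
          | none => r) (List.replicate feature_names.length (0 : Int))
      m ++ [row]) ([] : List (List Int))
  (feature_names, matrix)

-- ===== PRECONDITION & SPEC =====
def Spec_simple_vectorize (texts : List String) (method : String) (out : List String × List (List Int)) : Prop := out = simple_vectorize_alt texts method
instance (texts : List String) (method : String) (out : List String × List (List Int)) : Decidable (Spec_simple_vectorize texts method out) := by unfold Spec_simple_vectorize; infer_instance

-- ===== CLAIM (what is proved, stated in full; the proofs are below) =====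
def Claim_equal_simple_vectorize : Prop := ∀ (texts : List String) (method : String), Dom_simple_vectorize texts method → Spec_simple_vectorize texts method (simple_vectorize texts method)

-- ===== LEMMAS AND PROOFS =====

theorem svCol_items (fs : List String) (hnd : fs.Nodup) : (svCol fs).items = fs.zipIdx := by
  unfold svCol
  have h := PySem.Dict.items_foldl_insert_fresh (l := fs.zipIdx) (k := fun p => p.1)
      (v := fun p => p.2) (d := PySem.Dict.empty)
      (by intro a _; simp [PySem.Dict.contains_empty])
      (by simpa using hnd)
  simpa using h

theorem svCol_keys (fs : List String) (hnd : fs.Nodup) : (svCol fs).keys = fs := by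
  simp only [PySem.Dict.keys, svCol_items fs hnd]
  simp

theorem svCol_get_some (fs : List String) (hnd : fs.Nodup) (w : String) (i : Nat)
    (h : (svCol fs).get? w = some i) : ∃ hi : i < fs.length, fs[i] = w := by
  have hk : (svCol fs).keys.Nodup := by rw [svCol_keys fs hnd]; exact hnd
  have hm : (w, i) ∈ (svCol fs).items := PySem.Dict.mem_items_of_get?_eq_some _ h
  rw [svCol_items fs hnd] at hm
  have := List.mem_zipIdx hm
  exact ⟨by omega, by simpa using this.2.2.symm⟩

theorem svCol_get_none (fs : List String) (hnd : fs.Nodup) (w : String)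
    (h : (svCol fs).get? w = none) : w ∉ fs := by
  rw [PySem.Dict.get?_eq_none_iff_not_mem_keys] at h
  rwa [svCol_keys fs hnd] at h

theorem svRow (fs : List String) (hnd : fs.Nodup) (ws : List String) :
    ∀ g : String → Int,
    ws.foldl (fun r w => match (svCol fs).get? w with
        | some i => r.set i (r.getD i 0 + 1)
        | none => r) (fs.map g)
      = fs.map (fun f => g f + (ws.count f : Int)) := by
  induction ws with
  | nil => intro g; simp
  | cons w ws ih =>
    intro g
    simp only [List.foldl_cons]
    cases h : (svCol fs).get? w with
    | none =>
      have hw : w ∉ fs := svCol_get_none fs hnd w h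
      rw [ih g]
      apply List.map_congr_left
      intro f hf
      have hfw : ¬ (w == f) := by
        simp only [beq_iff_eq]
        intro he; exact hw (he ▸ hf)
      simp [List.count_cons, hfw]
    | some i =>
      obtain ⟨hi, hfi⟩ := svCol_get_some fs hnd w i h
      have hlen : i < (fs.map g).length := by simpa using hi
      have hgd : (fs.map g).getD i 0 = g w := by
        rw [List.getD_eq_getElem _ _ hlen]
        simp [hfi]
      dsimp only
      rw [hgd]
      have hset : (fs.map g).set i (g w + 1)
          = fs.map (fun f => if f = w then g f + 1 else g f) := by
        apply List.ext_getElem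
        · simp
        · intro j hj1 hj2
          rw [List.getElem_set]
          have hjf : j < fs.length := by simpa using hj2
          by_cases hji : i = j
          · subst hji
            simp [hfi]
          · have hne : fs[j] ≠ w := by
              intro he
              exact hji ((List.Nodup.getElem_inj_iff hnd).mp (hfi.trans he.symm))
            simp [hji, hne]
      rw [hset, ih]
      apply List.map_congr_left
      intro f hf
      by_cases hfw : f = w
      · subst hfw
        simp
        ring
      · have : ¬ (w == f) := by simp [beq_iff_eq]; exact fun he => hfw he.symm
        simp [List.count_cons, hfw, this]

theorem simple_vectorize_spec : Claim_equal_simple_vectorize := by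
  unfold Claim_equal_simple_vectorize
  intro texts method _
  unfold Spec_simple_vectorize
  unfold simple_vectorize simple_vectorize_alt
  -- the two word collections agree
  have hall : texts.foldl (fun acc text => acc ++ PySem.Str.split₀ text) ([] : List String)
      = texts.flatMap PySem.Str.split₀ := List.flatMap_eq_foldl.symm
  rw [hall]
  set xs := texts.flatMap PySem.Str.split₀ with hxs
  set fs := ((PySem.List.sorted (PySem.Dict.counter xs).items (fun p => p.2) true).take 20).map
      (fun p => p.1) with hfs
  -- the selected feature words are pairwise distinct
  have hnd : fs.Nodup := by
    have hkeys : ((PySem.Dict.counter xs).items.map (fun p => p.1)).Nodup := by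
      have := PySem.Dict.nodup_keys_counter (xs := xs)
      simpa [PySem.Dict.keys] using this
    have hperm : ((PySem.List.sorted (PySem.Dict.counter xs).items (fun p => p.2) true).map
        (fun p => p.1)).Perm ((PySem.Dict.counter xs).items.map (fun p => p.1)) :=
      (PySem.List.sorted_perm _ _ _).map _
    have hsnd : ((PySem.List.sorted (PySem.Dict.counter xs).items (fun p => p.2) true).map
        (fun p => p.1)).Nodup := hperm.nodup_iff.mpr hkeys
    rw [hfs, List.map_take]
    exact List.Nodup.sublist (List.take_sublist _ _) hsnd
  refine Prod.ext rfl ?_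
  simp only
  -- both matrices are maps over texts
  rw [PySem.List.foldl_append_singleton_eq_map, PySem.List.foldl_append_singleton_eq_map]
  simp only [List.nil_append]
  apply List.map_congr_left
  intro text _
  -- A's row for this text
  rw [PySem.List.foldl_append_singleton_eq_map]
  simp only [List.nil_append]
  -- B's row for this text
  have hrep : (List.replicate fs.length (0 : Int)) = fs.map (fun _ => (0 : Int)) := by
    simp
  rw [hrep, svRow fs hnd (PySem.Str.split₀ text)]
  apply List.map_congr_left
  intro f _
  simp [PySem.List.count_eq]

-- ===== VERDICT (by name: the statement is the Claim_ definition above) =====
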